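-- pv_equiv track=rewrite | github.com/Gryhon/hll_discord_utils | rcon/model.py | get_Group_and_Count
-- ===== SOURCE A (Python) =====
-- def get_Group_and_Count(numbers, limits):
--     # The limits list must be sorted
--     limits.sort()
--
--     # Add 0 as the starting point
--     counts = []
--     previous_limit = 0
--
--     # Count for each group
--     for limit in limits:
--         count = sum(1 for number in numbers if previous_limit <= number < limit)
--         counts.append(count)  # Füge die Zählung zur Liste hinzu
--         previous_limit = limit
--
--     # Count for the last group (limit to 500)
--     count = sum(1 for number in numbers if previous_limit <= number <= 500)
--     counts.append(count)  # Add the count of the last group to the list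
--
--     return counts
-- ===== SOURCE B (Python) =====
-- def get_Group_and_Count(numbers, limits):
--     # Sort limits in place (same observable mutation as the original).
--     limits.sort()
--     # Sort the numbers once; each bin count is then a difference of two
--     # binary-search positions instead of a full scan of numbers.
--     ns = sorted(numbers)
--     n = len(ns)
--
--     def lower(x):
--         # first index i with ns[i] >= x
--         lo, hi = 0, n
--         while lo < hi:
--             mid = (lo + hi) // 2
--             if ns[mid] < x:
--                 lo = mid + 1
--             else:
--                 hi = mid
--         return lo
--
--     def upper(x):
--         # first index i with ns[i] > x
--         lo, hi = 0, n
--         while lo < hi: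
--             mid = (lo + hi) // 2
--             if ns[mid] <= x:
--                 lo = mid + 1
--             else:
--                 hi = mid
--         return lo
--
--     counts = []
--     prev_pos = lower(0)
--     for limit in limits:
--         pos = lower(limit)
--         counts.append(max(0, pos - prev_pos))
--         prev_pos = pos
--     counts.append(max(0, upper(500) - prev_pos))
--     return counts
-- ===== Notes on version B (the rewrite author's own statement) =====
-- stated objective: faster
-- what changed: Instead of scanning all numbers once per bin, B sorts the numbers once and obtains each bin count as a clamped difference of two binary-search positions.
import Mathlib
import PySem

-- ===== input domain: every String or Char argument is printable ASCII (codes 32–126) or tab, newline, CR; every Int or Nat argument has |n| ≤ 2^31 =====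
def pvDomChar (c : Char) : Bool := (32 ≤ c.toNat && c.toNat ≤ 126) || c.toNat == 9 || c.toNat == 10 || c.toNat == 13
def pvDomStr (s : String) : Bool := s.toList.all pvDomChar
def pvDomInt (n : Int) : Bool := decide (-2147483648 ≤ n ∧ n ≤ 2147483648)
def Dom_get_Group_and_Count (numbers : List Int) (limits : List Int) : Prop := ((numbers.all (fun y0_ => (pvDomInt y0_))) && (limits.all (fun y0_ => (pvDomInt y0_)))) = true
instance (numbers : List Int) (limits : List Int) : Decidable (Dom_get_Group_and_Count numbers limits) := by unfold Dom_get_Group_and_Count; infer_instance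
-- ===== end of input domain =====

-- B sorts the numbers once and gets each bin count from two binary searches instead of
-- scanning all numbers per bin.  Both A and B sort `limits` in place (same side effect);
-- the equivalence proved here is about the return value.

-- ===== PORT A =====
def get_Group_and_Count (numbers : List Int) (limits : List Int) : List Int :=
  -- limits.sort()
  let limits' := PySem.List.sorted limits (fun x => x) false
  -- for limit in limits: count = sum(1 for number in numbers if prev <= number < limit)
  let st := limits'.foldl (fun (st : List Int × Int) limit =>
      let count := numbers.foldl
        (fun acc number => if st.2 ≤ number ∧ number < limit then acc + 1 else acc) (0 : Int)
      (st.1 ++ [count], limit)) ([], 0)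
  -- count = sum(1 for number in numbers if prev <= number <= 500)
  let count := numbers.foldl
    (fun acc number => if st.2 ≤ number ∧ number ≤ 500 then acc + 1 else acc) (0 : Int)
  st.1 ++ [count]

-- ===== PORT B =====
-- while lo < hi: mid = (lo+hi)//2; if ns[mid] < x: lo = mid+1 else hi = mid  (index always in range)
def pvLower (ns : List Int) (x : Int) (lo hi : Nat) : Nat :=
  if lo < hi then
    if ns.getD ((lo + hi) / 2) 0 < x then pvLower ns x ((lo + hi) / 2 + 1) hi
    else pvLower ns x lo ((lo + hi) / 2)
  else lo
termination_by hi - lo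
decreasing_by all_goals omega

-- same loop with ns[mid] <= x
def pvUpper (ns : List Int) (x : Int) (lo hi : Nat) : Nat :=
  if lo < hi then
    if ns.getD ((lo + hi) / 2) 0 ≤ x then pvUpper ns x ((lo + hi) / 2 + 1) hi
    else pvUpper ns x lo ((lo + hi) / 2)
  else lo
termination_by hi - lo
decreasing_by all_goals omega

def get_Group_and_Count_alt (numbers : List Int) (limits : List Int) : List Int :=
  let limits' := PySem.List.sorted limits (fun x => x) false
  let ns := PySem.List.sorted numbers (fun x => x) false
  let n := ns.length
  let st := limits'.foldl (fun (st : List Int × Nat) limit =>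
      let pos := pvLower ns limit 0 n
      (st.1 ++ [max 0 ((pos : Int) - (st.2 : Int))], pos)) ([], pvLower ns 0 0 n)
  st.1 ++ [max 0 ((pvUpper ns 500 0 n : Int) - (st.2 : Int))]

-- ===== PRECONDITION & SPEC =====
def Spec_get_Group_and_Count (numbers : List Int) (limits : List Int) (out : List Int) : Prop := out = get_Group_and_Count_alt numbers limits
instance (numbers : List Int) (limits : List Int) (out : List Int) : Decidable (Spec_get_Group_and_Count numbers limits out) := by unfold Spec_get_Group_and_Count; infer_instance

-- ===== CLAIM (what is proved, stated in full; the proofs are below) =====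
def Claim_equal_get_Group_and_Count : Prop := ∀ (numbers : List Int) (limits : List Int), Dom_get_Group_and_Count numbers limits → Spec_get_Group_and_Count numbers limits (get_Group_and_Count numbers limits)

-- ===== LEMMAS AND PROOFS =====

-- the number of elements < x (as a Nat)
def pvCnt (l : List Int) (x : Int) : Nat := l.countP (fun y => decide (y < x))

-- a list whose first k entries satisfy p and whose remaining entries do not has countP p = k
lemma countP_of_split (p : Int → Bool) :
    ∀ (l : List Int) (k : Nat), k ≤ l.length →
      (∀ i, i < k → p (l.getD i 0) = true) →
      (∀ i, k ≤ i → i < l.length → p (l.getD i 0) = false) →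
      l.countP p = k := by
  intro l
  induction l with
  | nil => intro k hk _ _; simp only [List.length_nil] at hk; simp only [List.countP_nil]; omega
  | cons y t ih =>
    intro k hk h1 h2
    cases k with
    | zero =>
      have hy : p y = false := h2 0 (Nat.zero_le _) (by simp)
      have ht : t.countP p = 0 := by
        apply ih 0 (Nat.zero_le _) (by omega)
        intro i _ hi
        exact h2 (i + 1) (by omega) (by simpa using Nat.succ_lt_succ hi)
      simp [hy, ht]
    | succ k =>
      have hy : p y = true := h1 0 (Nat.succ_pos _)
      have ht : t.countP p = k := by
        apply ih k (by simpa using hk)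
        · intro i hi; exact h1 (i + 1) (by omega)
        · intro i hik hi; exact h2 (i + 1) (by omega) (by simpa using Nat.succ_lt_succ hi)
      simp [hy, ht]

lemma sorted_getD_mono {ns : List Int} (hs : ns.Pairwise (· ≤ ·)) {i j : Nat}
    (hij : i ≤ j) (hj : j < ns.length) : ns.getD i 0 ≤ ns.getD j 0 := by
  rcases Nat.lt_or_ge i j with h | h
  · rw [List.getD_eq_getElem ns 0 (by omega), List.getD_eq_getElem ns 0 hj]
    exact List.pairwise_iff_getElem.mp hs i j (by omega) hj h
  · have : i = j := by omega
    subst this; exact le_refl _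

-- binary search on a sorted list returns the count of elements < x
lemma pvLower_eq {ns : List Int} (hs : ns.Pairwise (· ≤ ·)) (x : Int) :
    ∀ lo hi, lo ≤ hi → hi ≤ ns.length →
      (∀ i, i < lo → ns.getD i 0 < x) →
      (∀ i, hi ≤ i → i < ns.length → ¬ ns.getD i 0 < x) →
      pvLower ns x lo hi = pvCnt ns x := by
  intro lo hi
  induction lo, hi using pvLower.induct ns x with
  | case1 lo hi hlt hmid ih =>
    intro _ hhi h1 h2
    rw [pvLower, if_pos hlt, if_pos hmid]
    apply ih (by omega) hhi _ h2
    intro i hi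
    exact lt_of_le_of_lt (sorted_getD_mono hs (by omega) (by omega)) hmid
  | case2 lo hi hlt hmid ih =>
    intro hlo _ h1 _
    rw [pvLower, if_pos hlt, if_neg hmid]
    apply ih (by omega) (by omega) h1
    intro i hmi hilen
    exact fun hc => hmid (lt_of_le_of_lt (sorted_getD_mono hs hmi hilen) hc)
  | case3 lo hi hlt =>
    intro hlo hhi h1 h2
    have : lo = hi := by omega
    subst this
    rw [pvLower, if_neg hlt]
    exact (countP_of_split _ ns lo hhi
      (fun i hik => by simpa using h1 i hik)
      (fun i hik hilen => by simpa using h2 i hik hilen)).symm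

lemma pvUpper_eq_pvLower (ns : List Int) (x : Int) :
    ∀ lo hi, pvUpper ns x lo hi = pvLower ns (x + 1) lo hi := by
  intro lo hi
  induction lo, hi using pvUpper.induct ns x with
  | case1 lo hi hlt hmid ih =>
    rw [pvUpper, if_pos hlt, if_pos hmid, pvLower, if_pos hlt, if_pos (by omega), ih]
  | case2 lo hi hlt hmid ih =>
    rw [pvUpper, if_pos hlt, if_neg hmid, pvLower, if_pos hlt, if_neg (by omega), ih]
  | case3 lo hi hlt =>
    rw [pvUpper, if_neg hlt, pvLower, if_neg hlt]

-- the inner scan of A is a countP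
lemma foldl_count (p : Int → Prop) [DecidablePred p] :
    ∀ (l : List Int) (c : Int),
      l.foldl (fun acc y => if p y then acc + 1 else acc) c
        = c + l.countP (fun y => decide (p y)) := by
  intro l
  induction l with
  | nil => intro c; simp
  | cons y t ih =>
    intro c
    by_cases h : p y <;> simp [h, ih] <;> ring

lemma countP_lt_split {a b : Int} (hab : a ≤ b) (l : List Int) :
    l.countP (fun y => decide (y < b))
      = l.countP (fun y => decide (y < a)) + l.countP (fun y => decide (a ≤ y ∧ y < b)) := by
  induction l with
  | nil => simp
  | cons y t ih =>
    simp only [List.countP_cons, ih]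
    by_cases h1 : y < a <;> by_cases h2 : y < b <;> by_cases h3 : a ≤ y <;>
      simp [h1, h2, h3] <;> omega

lemma countP_lt_mono {a b : Int} (hba : b ≤ a) (l : List Int) :
    l.countP (fun y => decide (y < b)) ≤ l.countP (fun y => decide (y < a)) := by
  apply List.countP_mono_left
  intro y _ h
  simp only [decide_eq_true_eq] at *
  omega

-- the per-bin identity: count of a ≤ y < b equals the clamped difference of the two ranks
lemma bin_count (l : List Int) (a b : Int) :
    (l.countP (fun y => decide (a ≤ y ∧ y < b)) : Int)
      = max 0 ((pvCnt l b : Int) - (pvCnt l a : Int)) := by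
  unfold pvCnt
  by_cases hab : a ≤ b
  · have := countP_lt_split hab l
    omega
  · have h1 := countP_lt_mono (by omega : b ≤ a) l
    have h2 : l.countP (fun y => decide (a ≤ y ∧ y < b)) = 0 := by
      apply List.countP_eq_zero.mpr
      intro y _
      simp only [decide_eq_true_eq, not_and]
      omega
    omega

lemma countP_between_500 (l : List Int) (a : Int) :
    l.countP (fun y => decide (a ≤ y ∧ y ≤ (500 : Int)))
      = l.countP (fun y => decide (a ≤ y ∧ y < (501 : Int))) := by
  apply List.countP_congr
  intro y _
  constructor <;> intro h <;> simp only [decide_eq_true_eq] at * <;> omega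

-- rank queries on the sorted copy equal counts over the original list
lemma pvLower_full (numbers : List Int) (x : Int) :
    pvLower (PySem.List.sorted numbers (fun y => y) false) x 0
        (PySem.List.sorted numbers (fun y => y) false).length
      = pvCnt numbers x := by
  set ns := PySem.List.sorted numbers (fun y => y) false with hns
  have hs : ns.Pairwise (· ≤ ·) := by
    simpa using PySem.List.sorted_pairwise numbers (fun y => y)
  have hperm : ns.Perm numbers := PySem.List.sorted_perm numbers (fun y => y) false
  rw [pvLower_eq hs x 0 ns.length (Nat.zero_le _) (le_refl _)
      (by intro i hi; omega) (by intro i h1 h2; omega)]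
  unfold pvCnt
  exact hperm.countP_eq _

-- the main loop invariant: B's fold carries exactly the rank of A's previous_limit
lemma loop_rel (numbers : List Int) :
    ∀ (ls : List Int) (acc : List Int) (prev : Int),
      (ls.foldl (fun (st : List Int × Nat) limit =>
          let pos := pvLower (PySem.List.sorted numbers (fun y => y) false) limit 0
            (PySem.List.sorted numbers (fun y => y) false).length
          (st.1 ++ [max 0 ((pos : Int) - (st.2 : Int))], pos)) (acc, pvCnt numbers prev)).1
        = (ls.foldl (fun (st : List Int × Int) limit =>
            let count := numbers.foldl
              (fun acc number => if st.2 ≤ number ∧ number < limit then acc + 1 else acc) (0 : Int)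
            (st.1 ++ [count], limit)) (acc, prev)).1
      ∧ (ls.foldl (fun (st : List Int × Nat) limit =>
          let pos := pvLower (PySem.List.sorted numbers (fun y => y) false) limit 0
            (PySem.List.sorted numbers (fun y => y) false).length
          (st.1 ++ [max 0 ((pos : Int) - (st.2 : Int))], pos)) (acc, pvCnt numbers prev)).2
        = pvCnt numbers
            (ls.foldl (fun (st : List Int × Int) limit =>
              let count := numbers.foldl
                (fun acc number => if st.2 ≤ number ∧ number < limit then acc + 1 else acc) (0 : Int)
              (st.1 ++ [count], limit)) (acc, prev)).2 := by
  intro ls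
  induction ls with
  | nil => intro acc prev; exact ⟨rfl, rfl⟩
  | cons limit t ih =>
    intro acc prev
    simp only [List.foldl_cons]
    have hc : numbers.foldl
        (fun acc number => if prev ≤ number ∧ number < limit then acc + 1 else acc) (0 : Int)
        = max 0 ((pvLower (PySem.List.sorted numbers (fun y => y) false) limit 0
            (PySem.List.sorted numbers (fun y => y) false).length : Int)
            - (pvCnt numbers prev : Int)) := by
      rw [foldl_count (fun y => prev ≤ y ∧ y < limit) numbers 0, pvLower_full]
      have := bin_count numbers prev limit
      omega
    rw [hc, pvLower_full]
    exact ih (acc ++ [_]) limit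

-- ===== VERDICT (by name: the statement is the Claim_ definition above) =====
theorem get_Group_and_Count_spec : Claim_equal_get_Group_and_Count := by
  intro numbers limits _
  unfold Spec_get_Group_and_Count get_Group_and_Count get_Group_and_Count_alt
  simp only []
  have h0 : pvLower (PySem.List.sorted numbers (fun y => y) false) 0 0
      (PySem.List.sorted numbers (fun y => y) false).length = pvCnt numbers 0 :=
    pvLower_full numbers 0
  rw [h0]
  obtain ⟨h1, h2⟩ := loop_rel numbers (PySem.List.sorted limits (fun x => x) false) [] 0
  rw [h1, h2, pvUpper_eq_pvLower, pvLower_full]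
  congr 1
  rw [foldl_count (fun y => _ ≤ y ∧ y ≤ (500:Int)) numbers 0]
  have hb := bin_count numbers
    ((PySem.List.sorted limits (fun x => x) false).foldl (fun (st : List Int × Int) limit =>
      let count := numbers.foldl
        (fun acc number => if st.2 ≤ number ∧ number < limit then acc + 1 else acc) (0 : Int)
      (st.1 ++ [count], limit)) ([], 0)).2 501
  rw [countP_between_500]
  unfold pvCnt at hb ⊢
  simp only [hb]
  norm_num
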